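-- pv_equiv track=rewrite | github.com/sebastyijan-fi/diamond-lang | scripts/evolution/migrate_to_v1.py | _split_line_comment_preserve_strings
-- ===== SOURCE A (Python) =====
-- def _split_line_comment_preserve_strings(line: str) -> tuple[str, str]:
--     in_string = False
--     escape = False
--     i = 0
--     n = len(line)
--     while i < n:
--         ch = line[i]
--         if in_string:
--             if escape:
--                 escape = False
--             elif ch == "\\":
--                 escape = True
--             elif ch == '"':
--                 in_string = False
--             i += 1
--             continue
--         if ch == '"':
--             in_string = True
--             i += 1
--             continue
--         if ch == "/" and i + 1 < n and line[i + 1] == "/":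
--             return line[:i], line[i:]
--         i += 1
--     return line, ""
-- ===== SOURCE B (Python) =====
-- def _split_line_comment_preserve_strings(line: str) -> tuple[str, str]:
--     # Gallop with str.find instead of a char-by-char state machine: jump to the
--     # next '"' / '//' occurrence; a quote found at position k closes a string
--     # literal iff the run of consecutive backslashes immediately before k has
--     # even length (escapes pair off left to right).
--     n = len(line)
--     i = 0
--     while True:
--         c = line.find('//', i)
--         q = line.find('"', i)
--         if c != -1 and (q == -1 or c < q):
--             return line[:c], line[c:]
--         if q == -1:
--             return line, ''
--         j = q + 1
--         while True:
--             k = line.find('"', j)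
--             if k == -1:
--                 return line, ''
--             r = 0
--             while r + 1 <= k and line[k - r - 1] == '\\':
--                 r += 1
--             j = k + 1
--             if r % 2 == 0:
--                 i = j
--                 break
-- ===== Notes on version B (the rewrite author's own statement) =====
-- stated objective: faster
-- what changed: Replaces A's char-by-char in_string/escape state machine by a str.find gallop: jump directly to the next quote or comment-marker occurrence and decide whether a found quote closes a literal by the parity of the backslash run immediately before it.
import Mathlib
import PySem

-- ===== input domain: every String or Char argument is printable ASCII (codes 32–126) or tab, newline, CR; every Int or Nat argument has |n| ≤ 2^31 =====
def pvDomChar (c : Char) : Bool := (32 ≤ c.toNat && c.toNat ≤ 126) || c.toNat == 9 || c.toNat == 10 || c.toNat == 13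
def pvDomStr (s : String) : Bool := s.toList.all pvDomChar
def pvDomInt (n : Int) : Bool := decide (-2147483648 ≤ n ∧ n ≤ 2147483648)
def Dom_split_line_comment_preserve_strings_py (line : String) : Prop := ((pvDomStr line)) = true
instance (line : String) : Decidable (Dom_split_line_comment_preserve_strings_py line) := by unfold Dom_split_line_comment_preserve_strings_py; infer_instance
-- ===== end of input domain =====

-- B replaces A's char-by-char in_string/escape state machine by a str.find gallop:
-- jump to the next '"' / '//' occurrence; a found quote closes a literal iff the
-- backslash run immediately before it has even length (different algorithm; a timing run measured B faster by a constant factor).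
-- Loops are ported with a structural fuel counter; fuel n+1 is sufficient (each
-- iteration advances the index), so the base case is never reached on the entry calls.

-- ===== PORT A =====
-- A's while loop over index i with state (in_string, escape); line[i] with 0 ≤ i < n is total.
def goA_split (L : List Char) (n : Nat) (fuel i : Nat) (in_string escape : Bool) : String × String :=
  match fuel with
  | 0 => (String.ofList L, "")
  | fuel+1 =>
    if i < n then
      let ch := L.getD i ' '
      if in_string then
        if escape then goA_split L n fuel (i+1) in_string false
        else if ch = '\\' then goA_split L n fuel (i+1) in_string true
        else if ch = '"' then goA_split L n fuel (i+1) false escape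
        else goA_split L n fuel (i+1) in_string escape
      else if ch = '"' then goA_split L n fuel (i+1) true escape
      else if ch = '/' ∧ i + 1 < n ∧ L.getD (i+1) ' ' = '/' then
        (String.ofList (L.take i), String.ofList (L.drop i))
      else goA_split L n fuel (i+1) in_string escape
    else (String.ofList L, "")

def split_line_comment_preserve_strings_py (line : String) : String × String :=
  goA_split line.toList line.toList.length (line.toList.length + 1) 0 false false

-- ===== PORT B =====
-- hand port of line.find('"', i) for a natural start index: first position ≥ i
-- holding '"' (none encodes Python's -1); exact for the calls B makes (i ≥ 0).
def findQuote (L : List Char) (n : Nat) (fuel i : Nat) : Option Nat :=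
  match fuel with
  | 0 => none
  | fuel+1 =>
    if i < n then
      if L.getD i ' ' = '"' then some i else findQuote L n fuel (i+1)
    else none

-- hand port of line.find('//', i): first position ≥ i starting the substring "//".
def findCom (L : List Char) (n : Nat) (fuel i : Nat) : Option Nat :=
  match fuel with
  | 0 => none
  | fuel+1 =>
    if i + 1 < n then
      if L.getD i ' ' = '/' ∧ L.getD (i+1) ' ' = '/' then some i else findCom L n fuel (i+1)
    else none

-- Source B's innermost loop: length of the backslash run ending just before index k.
def runBack (L : List Char) (k : Nat) (fuel r : Nat) : Nat :=
  match fuel with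
  | 0 => r
  | fuel+1 =>
    if r + 1 ≤ k ∧ L.getD (k - r - 1) ' ' = '\\' then runBack L k fuel (r+1) else r

-- Source B's inner while loop: skip a string literal opened just before index j;
-- some i' = resume index after the closing quote, none = unterminated literal.
def skipString (L : List Char) (n : Nat) (fuel j : Nat) : Option Nat :=
  match fuel with
  | 0 => none
  | fuel+1 =>
    match findQuote L n (n+1) j with
    | none => none
    | some k =>
      if runBack L k (k+1) 0 % 2 = 0 then some (k+1) else skipString L n fuel (k+1)

-- Source B's outer while loop
def goB_split (L : List Char) (n : Nat) (fuel i : Nat) : String × String :=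
  match fuel with
  | 0 => (String.ofList L, "")
  | fuel+1 =>
    match findCom L n (n+1) i, findQuote L n (n+1) i with
    | some cv, none => (String.ofList (L.take cv), String.ofList (L.drop cv))
    | some cv, some qv =>
        if cv < qv then (String.ofList (L.take cv), String.ofList (L.drop cv))
        else
          match skipString L n (n+1) (qv+1) with
          | none => (String.ofList L, "")
          | some i' => goB_split L n fuel i'
    | none, some qv =>
        match skipString L n (n+1) (qv+1) with
        | none => (String.ofList L, "")
        | some i' => goB_split L n fuel i'
    | none, none => (String.ofList L, "")

def split_line_comment_preserve_strings_py_alt (line : String) : String × String :=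
  goB_split line.toList line.toList.length (line.toList.length + 1) 0

-- ===== PRECONDITION & SPEC =====
def Spec_split_line_comment_preserve_strings_py (line : String) (out : String × String) : Prop := out = split_line_comment_preserve_strings_py_alt line
instance (line : String) (out : String × String) : Decidable (Spec_split_line_comment_preserve_strings_py line out) := by unfold Spec_split_line_comment_preserve_strings_py; infer_instance

-- ===== CLAIM (what is proved, stated in full; the proofs are below) =====
def Claim_equal_split_line_comment_preserve_strings_py : Prop := ∀ (line : String), Dom_split_line_comment_preserve_strings_py line → Spec_split_line_comment_preserve_strings_py line (split_line_comment_preserve_strings_py line)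

-- ===== LEMMAS AND PROOFS =====

-- fuel irrelevance: any two sufficient fuels give the same run of A's loop
theorem goA_fuel (L : List Char) (n : Nat) : ∀ f1 f2 i s e, n - i < f1 → n - i < f2 →
    goA_split L n f1 i s e = goA_split L n f2 i s e := by
  intro f1
  induction f1 with
  | zero => intro f2 i s e h1 h2; omega
  | succ a ih =>
    intro f2 i s e h1 h2
    cases f2 with
    | zero => omega
    | succ b =>
      rw [goA_split, goA_split]
      by_cases hi : i < n
      · simp only [if_pos hi]
        split_ifs <;> first
          | rfl
          | exact ih b (i+1) _ _ (by omega) (by omega)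
      · simp [hi]

theorem goA_stop (L : List Char) (n : Nat) : ∀ fuel i (s e : Bool), ¬ i < n →
    goA_split L n fuel i s e = (String.ofList L, "") := by
  intro fuel i s e h
  cases fuel <;> rw [goA_split] <;> simp [h]

theorem goA_in_esc (L : List Char) (n i : Nat) (h : i < n) :
    goA_split L n (n+1) i true true = goA_split L n (n+1) (i+1) true false := by
  rw [goA_split]
  simp only [if_pos h, if_pos rfl]
  exact goA_fuel L n n (n+1) (i+1) true false (by omega) (by omega)

theorem goA_in_step (L : List Char) (n i : Nat) (h : i < n) :
    goA_split L n (n+1) i true false =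
      if L.getD i ' ' = '\\' then goA_split L n (n+1) (i+1) true true
      else if L.getD i ' ' = '"' then goA_split L n (n+1) (i+1) false false
      else goA_split L n (n+1) (i+1) true false := by
  rw [goA_split]
  simp only [if_pos h]
  split_ifs <;>
    first
      | exact goA_fuel L n n (n+1) (i+1) _ _ (by omega) (by omega)
      | simp_all

theorem goA_out_step (L : List Char) (n i : Nat) (h : i < n) :
    goA_split L n (n+1) i false false =
      if L.getD i ' ' = '"' then goA_split L n (n+1) (i+1) true false
      else if L.getD i ' ' = '/' ∧ i + 1 < n ∧ L.getD (i+1) ' ' = '/' then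
        (String.ofList (L.take i), String.ofList (L.drop i))
      else goA_split L n (n+1) (i+1) false false := by
  rw [goA_split]
  simp only [if_pos h]
  split_ifs <;>
    first
      | exact goA_fuel L n n (n+1) (i+1) _ _ (by omega) (by omega)
      | simp_all
      | rfl

theorem findQuote_some_ge (L : List Char) (n : Nat) : ∀ fuel j k, findQuote L n fuel j = some k → j ≤ k ∧ k < n := by
  intro fuel
  induction fuel with
  | zero => intro j k h; cases h
  | succ a ih =>
    intro j k h
    rw [findQuote] at h
    split at h
    next hj =>
      split at h
      next => injection h with h; omega
      next => have := ih (j+1) k h; omega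
    next => cases h

theorem findQuote_none_spec (L : List Char) (n : Nat) : ∀ fuel j, n - j < fuel → findQuote L n fuel j = none →
    ∀ m, j ≤ m → m < n → L.getD m ' ' ≠ '"' := by
  intro fuel
  induction fuel with
  | zero => intro j h; omega
  | succ a ih =>
    intro j hs h m hjm hmn
    rw [findQuote] at h
    split at h
    next hj =>
      split at h
      next => cases h
      next hq =>
        rcases Nat.eq_or_lt_of_le hjm with rfl | hlt
        · exact hq
        · exact ih (j+1) (by omega) h m hlt hmn
    next hj => omega

theorem findQuote_some_spec (L : List Char) (n : Nat) : ∀ fuel j k, findQuote L n fuel j = some k →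
    L.getD k ' ' = '"' ∧ ∀ m, j ≤ m → m < k → L.getD m ' ' ≠ '"' := by
  intro fuel
  induction fuel with
  | zero => intro j k h; cases h
  | succ a ih =>
    intro j k h
    rw [findQuote] at h
    split at h
    next hj =>
      split at h
      next hq =>
        injection h with h; subst h
        exact ⟨hq, fun m h1 h2 => absurd (le_trans h1 (Nat.le_of_lt h2)) (by omega)⟩
      next hq =>
        obtain ⟨hc, hmin⟩ := ih (j+1) k h
        refine ⟨hc, fun m h1 h2 => ?_⟩
        rcases Nat.eq_or_lt_of_le h1 with rfl | hlt
        · exact hq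
        · exact hmin m hlt h2
    next => cases h

theorem findCom_none_spec (L : List Char) (n : Nat) : ∀ fuel j, n - j < fuel → findCom L n fuel j = none →
    ∀ m, j ≤ m → ¬ (L.getD m ' ' = '/' ∧ m + 1 < n ∧ L.getD (m+1) ' ' = '/') := by
  intro fuel
  induction fuel with
  | zero => intro j h; omega
  | succ a ih =>
    intro j hs h m hjm hcom
    rw [findCom] at h
    split at h
    next hj =>
      split at h
      next => cases h
      next hq =>
        rcases Nat.eq_or_lt_of_le hjm with rfl | hlt
        · exact hq ⟨hcom.1, hcom.2.2⟩
        · exact ih (j+1) (by omega) h m hlt hcom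
    next hj => omega

theorem findCom_some_spec (L : List Char) (n : Nat) : ∀ fuel j k, findCom L n fuel j = some k →
    j ≤ k ∧ (L.getD k ' ' = '/' ∧ k + 1 < n ∧ L.getD (k+1) ' ' = '/') ∧
    ∀ m, j ≤ m → m < k → ¬ (L.getD m ' ' = '/' ∧ m + 1 < n ∧ L.getD (m+1) ' ' = '/') := by
  intro fuel
  induction fuel with
  | zero => intro j k h; cases h
  | succ a ih =>
    intro j k h
    rw [findCom] at h
    split at h
    next hj =>
      split at h
      next hq =>
        injection h with h; subst h
        exact ⟨le_refl _, ⟨hq.1, hj, hq.2⟩, fun m h1 h2 => absurd (le_trans h1 (Nat.le_of_lt h2)) (by omega)⟩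
      next hq =>
        obtain ⟨hge, hc, hmin⟩ := ih (j+1) k h
        refine ⟨by omega, hc, fun m h1 h2 hcom => ?_⟩
        rcases Nat.eq_or_lt_of_le h1 with rfl | hlt
        · exact hq ⟨hcom.1, hcom.2.2⟩
        · exact hmin m hlt h2 hcom
    next => cases h

theorem runBack_ge (L : List Char) (k : Nat) : ∀ fuel r, r ≤ runBack L k fuel r := by
  intro fuel
  induction fuel with
  | zero => intro r; rw [runBack]
  | succ a ih =>
    intro r
    rw [runBack]
    split
    next => have := ih (r+1); omega
    next => omega

theorem runBack_le (L : List Char) (k : Nat) : ∀ fuel r, r ≤ k → runBack L k fuel r ≤ k := by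
  intro fuel
  induction fuel with
  | zero => intro r h; rw [runBack]; exact h
  | succ a ih =>
    intro r h
    rw [runBack]
    split
    next hc => exact ih (r+1) hc.1
    next => exact h

theorem runBack_last (L : List Char) (k : Nat) : ∀ fuel r, k - r < fuel →
    ¬ (runBack L k fuel r + 1 ≤ k ∧ L.getD (k - runBack L k fuel r - 1) ' ' = '\\') := by
  intro fuel
  induction fuel with
  | zero => intro r h; omega
  | succ a ih =>
    intro r h
    rw [runBack]
    split
    next hc => exact ih (r+1) (by omega)
    next hc => exact hc

theorem runBack_all (L : List Char) (k : Nat) : ∀ fuel r t, r ≤ t → t < runBack L k fuel r →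
    L.getD (k - t - 1) ' ' = '\\' := by
  intro fuel
  induction fuel with
  | zero => intro r t h1 h2; rw [runBack] at h2; omega
  | succ a ih =>
    intro r t hrt ht
    rw [runBack] at ht
    split at ht
    next hc =>
      rcases Nat.eq_or_lt_of_le hrt with rfl | hlt
      · exact hc.2
      · exact ih (r+1) t hlt ht
    next => omega

theorem skipString_fuel (L : List Char) (n : Nat) : ∀ f1 f2 j, n - j < f1 → n - j < f2 →
    skipString L n f1 j = skipString L n f2 j := by
  intro f1
  induction f1 with
  | zero => intro f2 j h1 h2; omega
  | succ a ih =>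
    intro f2 j h1 h2
    cases f2 with
    | zero => omega
    | succ b =>
      rw [skipString, skipString]
      cases hq : findQuote L n (n+1) j with
      | none => rfl
      | some k =>
        have hge := findQuote_some_ge L n (n+1) j k hq
        dsimp only
        split
        · rfl
        · exact ih b (k+1) (by omega) (by omega)

theorem skipString_step (L : List Char) (n j : Nat) :
    skipString L n (n+1) j =
      match findQuote L n (n+1) j with
      | none => none
      | some k =>
        if runBack L k (k+1) 0 % 2 = 0 then some (k+1) else skipString L n (n+1) (k+1) := by
  rw [skipString]
  cases hq : findQuote L n (n+1) j with
  | none => rfl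
  | some k =>
    have hge := findQuote_some_ge L n (n+1) j k hq
    dsimp only
    split
    · rfl
    · exact skipString_fuel L n n (n+1) (k+1) (by omega) (by omega)

theorem skipString_gt (L : List Char) (n : Nat) : ∀ fuel j i', skipString L n fuel j = some i' → j < i' := by
  intro fuel
  induction fuel with
  | zero => intro j i' h; cases h
  | succ a ih =>
    intro j i' h
    rw [skipString] at h
    cases hq : findQuote L n (n+1) j with
    | none => rw [hq] at h; cases h
    | some k =>
      have hge := findQuote_some_ge L n (n+1) j k hq
      rw [hq] at h
      dsimp only at h
      split at h
      next => injection h with h; omega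
      next => have := ih (k+1) i' h; omega

theorem goB_fuel (L : List Char) (n : Nat) : ∀ f1 f2 i, n - i < f1 → n - i < f2 →
    goB_split L n f1 i = goB_split L n f2 i := by
  intro f1
  induction f1 with
  | zero => intro f2 i h1 h2; omega
  | succ a ih =>
    intro f2 i h1 h2
    cases f2 with
    | zero => omega
    | succ b =>
      rw [goB_split, goB_split]
      cases hc : findCom L n (n+1) i with
      | none =>
        cases hq : findQuote L n (n+1) i with
        | none => rfl
        | some qv =>
          have hge := findQuote_some_ge L n (n+1) i qv hq
          dsimp only
          cases hs : skipString L n (n+1) (qv+1) with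
          | none => rfl
          | some i' =>
            have := skipString_gt L n (n+1) (qv+1) i' hs
            exact ih b i' (by omega) (by omega)
      | some cv =>
        cases hq : findQuote L n (n+1) i with
        | none => rfl
        | some qv =>
          have hge := findQuote_some_ge L n (n+1) i qv hq
          dsimp only
          split
          · rfl
          · cases hs : skipString L n (n+1) (qv+1) with
            | none => rfl
            | some i' =>
              have := skipString_gt L n (n+1) (qv+1) i' hs
              exact ih b i' (by omega) (by omega)

theorem goB_step (L : List Char) (n i : Nat) :
    goB_split L n (n+1) i =
      match findCom L n (n+1) i, findQuote L n (n+1) i with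
      | some cv, none => (String.ofList (L.take cv), String.ofList (L.drop cv))
      | some cv, some qv =>
          if cv < qv then (String.ofList (L.take cv), String.ofList (L.drop cv))
          else
            match skipString L n (n+1) (qv+1) with
            | none => (String.ofList L, "")
            | some i' => goB_split L n (n+1) i'
      | none, some qv =>
          match skipString L n (n+1) (qv+1) with
          | none => (String.ofList L, "")
          | some i' => goB_split L n (n+1) i'
      | none, none => (String.ofList L, "") := by
  rw [goB_split]
  cases hc : findCom L n (n+1) i with
  | none =>
    cases hq : findQuote L n (n+1) i with
    | none => rfl
    | some qv =>
      have hge := findQuote_some_ge L n (n+1) i qv hq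
      dsimp only
      cases hs : skipString L n (n+1) (qv+1) with
      | none => rfl
      | some i' =>
        have := skipString_gt L n (n+1) (qv+1) i' hs
        exact goB_fuel L n n (n+1) i' (by omega) (by omega)
  | some cv =>
    cases hq : findQuote L n (n+1) i with
    | none => rfl
    | some qv =>
      have hge := findQuote_some_ge L n (n+1) i qv hq
      dsimp only
      split
      · rfl
      · cases hs : skipString L n (n+1) (qv+1) with
        | none => rfl
        | some i' =>
          have := skipString_gt L n (n+1) (qv+1) i' hs
          exact goB_fuel L n n (n+1) i' (by omega) (by omega)

-- in-string with no quote ahead: A consumes the rest of the line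
theorem goA_noquote (L : List Char) (n : Nat) : ∀ j (esc : Bool),
    (∀ m, j ≤ m → m < n → L.getD m ' ' ≠ '"') →
    goA_split L n (n+1) j true esc = (String.ofList L, "") := by
  intro j
  generalize hm : n - j = d
  induction d using Nat.strong_induction_on generalizing j with
  | _ d ih =>
  intro esc hq
  by_cases hj : j < n
  · have step : ∀ e, goA_split L n (n+1) (j+1) true e = (String.ofList L, "") :=
      fun e => ih (n - (j+1)) (by omega) (j+1) rfl e (fun m h1 h2 => hq m (by omega) h2)
    cases esc with
    | true => rw [goA_in_esc L n j hj]; exact step false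
    | false =>
      rw [goA_in_step L n j hj]
      split_ifs with h1 h2
      · exact step true
      · exact absurd h2 (hq j (le_refl _) hj)
      · exact step false
  · exact goA_stop L n (n+1) j true esc hj

-- out-of-string skip over positions with no quote and no comment start
theorem goA_skipout (L : List Char) (n : Nat) : ∀ j t, j ≤ t → t ≤ n →
    (∀ m, j ≤ m → m < t → L.getD m ' ' ≠ '"' ∧
      ¬ (L.getD m ' ' = '/' ∧ m + 1 < n ∧ L.getD (m+1) ' ' = '/')) →
    goA_split L n (n+1) j false false = goA_split L n (n+1) t false false := by
  intro j t
  generalize hm : t - j = d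
  induction d using Nat.strong_induction_on generalizing j with
  | _ d ih =>
  intro hjt htn hmask
  rcases Nat.eq_or_lt_of_le hjt with rfl | hlt
  · rfl
  · have hj : j < n := by omega
    rw [goA_out_step L n j hj]
    obtain ⟨h1, h2⟩ := hmask j (le_refl _) hlt
    rw [if_neg h1, if_neg h2]
    exact ih (t - (j+1)) (by omega) (j+1) rfl hlt htn (fun m hm1 hm2 => hmask m (by omega) hm2)

-- in-string scan up to the next quote k: the escape state on arrival is the parity
-- of the backslash run before k, truncated at j
theorem goA_parity (L : List Char) (n k : Nat) (hk : k < n) (hq : L.getD k ' ' = '"') :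
    ∀ j, j ≤ k → (∀ m, j ≤ m → m < k → L.getD m ' ' ≠ '"') →
    goA_split L n (n+1) j true false =
      if (min (runBack L k (k+1) 0) (k - j)) % 2 = 0 then goA_split L n (n+1) (k+1) false false
      else goA_split L n (n+1) (k+1) true false := by
  intro j
  generalize hm : k - j = d
  induction d using Nat.strong_induction_on generalizing j with
  | _ d ih =>
  intro hjk hnoq
  subst hm
  rcases Nat.eq_or_lt_of_le hjk with rfl | hlt
  · simp only [Nat.sub_self, Nat.min_zero]
    rw [goA_in_step L n j hk, if_neg (by rw [hq]; decide), if_pos hq]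
    norm_num
  · have hj : j < n := by omega
    by_cases hbs : L.getD j ' ' = '\\'
    · rw [goA_in_step L n j hj, if_pos hbs]
      by_cases hjk1 : j + 1 = k
      · rw [goA_in_esc L n (j+1) (by omega)]
        have hr1 : 1 ≤ runBack L k (k+1) 0 := by
          have h := runBack_ge L k k 1
          rw [runBack]
          rw [if_pos ⟨by omega, by simpa [show k - 0 - 1 = j by omega, show k - 1 = j by omega] using hbs⟩]
          omega
        have : min (runBack L k (k+1) 0) (k - j) = 1 := by omega
        rw [this]
        norm_num
        rw [show j + 1 + 1 = k + 1 by omega]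
      · have hj1 : j + 1 < n := by omega
        rw [goA_in_esc L n (j+1) hj1]
        rw [ih (k - (j+2)) (by omega) (j+2) rfl (by omega) (fun m h1 h2 => hnoq m (by omega) h2)]
        have hpar : min (runBack L k (k+1) 0) (k - j) % 2 = min (runBack L k (k+1) 0) (k - (j+2)) % 2 := by
          set r := runBack L k (k+1) 0 with hr
          have hne : r ≠ k - j - 1 := by
            intro he
            apply runBack_last L k (k+1) 0 (by omega)
            constructor
            · omega
            · have : k - r - 1 = j := by omega
              rw [this]; exact hbs
          rcases Nat.lt_or_ge r (k - j) with hlo | hhi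
          · have : r ≤ k - j - 2 := by omega
            omega
          · omega
        rw [hpar]
    · rw [goA_in_step L n j hj, if_neg hbs, if_neg (hnoq j (le_refl _) hlt)]
      rw [ih (k - (j+1)) (by omega) (j+1) rfl (by omega) (fun m h1 h2 => hnoq m (by omega) h2)]
      have : runBack L k (k+1) 0 ≤ k - j - 1 := by
        by_contra hgt
        exact hbs (by simpa [show k - (k - j - 1) - 1 = j by omega]
          using runBack_all L k (k+1) 0 (k - j - 1) (by omega) (by omega))
      have hpar : min (runBack L k (k+1) 0) (k - j) = min (runBack L k (k+1) 0) (k - (j+1)) := by omega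
      rw [hpar]

-- A's in-string phase agrees with B's skipString
theorem goA_in_skip (L : List Char) (n : Nat) : ∀ j, j ≤ n →
    (j = 0 ∨ L.getD (j-1) ' ' ≠ '\\') →
    goA_split L n (n+1) j true false =
      (match skipString L n (n+1) j with
       | none => (String.ofList L, "")
       | some i' => goA_split L n (n+1) i' false false) := by
  intro j
  generalize hm : n - j = d
  induction d using Nat.strong_induction_on generalizing j with
  | _ d ih =>
  intro hjn hH
  rw [skipString_step]
  cases hfq : findQuote L n (n+1) j with
  | none =>
    exact goA_noquote L n j false (findQuote_none_spec L n (n+1) j (by omega) hfq)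
  | some k =>
    obtain ⟨hjk, hkn⟩ := findQuote_some_ge L n (n+1) j k hfq
    obtain ⟨hqc, hmin⟩ := findQuote_some_spec L n (n+1) j k hfq
    have hrle : runBack L k (k+1) 0 ≤ k - j := by
      rcases hH with rfl | hnb
      · simpa using runBack_le L k (k+1) 0 (by omega)
      · by_contra hgt
        rcases Nat.eq_zero_or_pos j with rfl | hj0
        · have := runBack_le L k (k+1) 0 (by omega); omega
        · exact hnb (by simpa [show k - (k - j) - 1 = j - 1 by omega]
            using runBack_all L k (k+1) 0 (k - j) (by omega) (by omega))
    have hmm : min (runBack L k (k+1) 0) (k - j) = runBack L k (k+1) 0 := by omega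
    rw [goA_parity L n k hkn hqc j hjk hmin, hmm]
    dsimp only
    by_cases hr : runBack L k (k+1) 0 % 2 = 0
    · rw [if_pos hr, if_pos hr]
    · rw [if_neg hr, if_neg hr]
      exact ih (n - (k+1)) (by omega) (k+1) rfl (by omega) (Or.inr (by simpa using (by rw [hqc]; decide : L.getD k ' ' ≠ '\\')))

theorem goA_eq_goB (L : List Char) (n : Nat) : ∀ i, goA_split L n (n+1) i false false = goB_split L n (n+1) i := by
  intro i
  generalize hm : n - i = d
  induction d using Nat.strong_induction_on generalizing i with
  | _ d ih =>
  have hstring : ∀ qv, findQuote L n (n+1) i = some qv →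
      (∀ m, i ≤ m → m < qv → ¬ (L.getD m ' ' = '/' ∧ m + 1 < n ∧ L.getD (m+1) ' ' = '/')) →
      goA_split L n (n+1) i false false =
        (match skipString L n (n+1) (qv+1) with
         | none => (String.ofList L, "")
         | some i' => goB_split L n (n+1) i') := by
    intro qv hq hnoc
    obtain ⟨hiq, hqn⟩ := findQuote_some_ge L n (n+1) i qv hq
    obtain ⟨hqc, hqmin⟩ := findQuote_some_spec L n (n+1) i qv hq
    rw [goA_skipout L n i qv hiq (by omega) (fun m h1 h2 => ⟨hqmin m h1 h2, hnoc m h1 h2⟩)]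
    rw [goA_out_step L n qv hqn, if_pos hqc]
    rw [goA_in_skip L n (qv+1) (by omega) (Or.inr (by simpa using (by rw [hqc]; decide : L.getD qv ' ' ≠ '\\')))]
    cases hs : skipString L n (n+1) (qv+1) with
    | none => rfl
    | some i' =>
      have hgt := skipString_gt L n (n+1) (qv+1) i' hs
      exact ih (n - i') (by omega) i' rfl
  have hcomment : ∀ cv, findCom L n (n+1) i = some cv →
      (∀ m, i ≤ m → m < cv → L.getD m ' ' ≠ '"') →
      goA_split L n (n+1) i false false = (String.ofList (L.take cv), String.ofList (L.drop cv)) := by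
    intro cv hc hnoq
    obtain ⟨hic, hcch, hcmin⟩ := findCom_some_spec L n (n+1) i cv hc
    rw [goA_skipout L n i cv hic (by omega) (fun m h1 h2 => ⟨hnoq m h1 h2, hcmin m h1 h2⟩)]
    rw [goA_out_step L n cv (by omega), if_neg (by rw [hcch.1]; decide), if_pos hcch]
  rw [goB_step]
  cases hc : findCom L n (n+1) i with
  | none =>
    cases hq : findQuote L n (n+1) i with
    | none =>
      dsimp only
      have hnone : ∀ m, i ≤ m → m < n → L.getD m ' ' ≠ '"' ∧
          ¬ (L.getD m ' ' = '/' ∧ m + 1 < n ∧ L.getD (m+1) ' ' = '/') :=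
        fun m h1 h2 => ⟨findQuote_none_spec L n (n+1) i (by omega) hq m h1 h2,
          findCom_none_spec L n (n+1) i (by omega) hc m h1⟩
      by_cases hin : i ≤ n
      · rw [goA_skipout L n i n hin (le_refl _) hnone]
        exact goA_stop L n (n+1) n false false (by omega)
      · exact goA_stop L n (n+1) i false false (by omega)
    | some qv =>
      dsimp only
      exact hstring qv hq (fun m h1 _ => findCom_none_spec L n (n+1) i (by omega) hc m h1)
  | some cv =>
    obtain ⟨hic, hcch, hcmin⟩ := findCom_some_spec L n (n+1) i cv hc
    cases hq : findQuote L n (n+1) i with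
    | none =>
      dsimp only
      exact hcomment cv hc (fun m h1 h2 => findQuote_none_spec L n (n+1) i (by omega) hq m h1 (by omega))
    | some qv =>
      dsimp only
      obtain ⟨hiq, hqn⟩ := findQuote_some_ge L n (n+1) i qv hq
      by_cases hcq : cv < qv
      · rw [if_pos hcq]
        exact hcomment cv hc (fun m h1 h2 => (findQuote_some_spec L n (n+1) i qv hq).2 m h1 (by omega))
      · rw [if_neg hcq]
        exact hstring qv hq (fun m h1 h2 => hcmin m h1 (by omega))

-- ===== VERDICT (by name: the statement is the Claim_ definition above) =====
theorem split_line_comment_preserve_strings_py_spec : Claim_equal_split_line_comment_preserve_strings_py := by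
  intro line _
  unfold Spec_split_line_comment_preserve_strings_py split_line_comment_preserve_strings_py split_line_comment_preserve_strings_py_alt
  exact goA_eq_goB line.toList line.toList.length 0
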